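-- pv_equiv track=rewrite | github.com/Itsuki0016/encryptor | crypto/utils.py | rot13_encrypt
-- ===== SOURCE A (Python) =====
-- def rot13_encrypt(text):
--     """
--     ROT13暗号による暗号化
--
--     Caesar暗号の特殊なケースで、13文字シフトします。
--     ROT13は自己逆変換のため、同じ処理で暗号化・復号化が可能です。
--
--     Args:
--         text (str): 暗号化対象のテキスト
--
--     Returns:
--         str: ROT13で暗号化されたテキスト
--     """
--     result = ''
--     for char in text:
--         if char.isalpha():
--             base = ord('A') if char.isupper() else ord('a')
--             # 13文字シフト（26文字の半分）
--             result += chr((ord(char) - base + 13) % 26 + base)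
--         else:
--             result += char
--     return result
-- ===== SOURCE B (Python) =====
-- _ROT13 = str.maketrans(
--     "ABCDEFGHIJKLMNOPQRSTUVWXYZabcdefghijklmnopqrstuvwxyz",
--     "NOPQRSTUVWXYZABCDEFGHIJKLMnopqrstuvwxyzabcdefghijklm")
--
--
-- def rot13_encrypt(text):
--     return text.translate(_ROT13)
-- ===== Notes on version B (the rewrite author's own statement) =====
-- stated objective: idiomatic
-- what changed: Replaces the per-character isalpha/isupper branching, arithmetic and string += with a fixed 52-entry ROT13 translation table built once via str.maketrans, applied by a single text.translate call (C-level pass, no quadratic string concatenation).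
import Mathlib
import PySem

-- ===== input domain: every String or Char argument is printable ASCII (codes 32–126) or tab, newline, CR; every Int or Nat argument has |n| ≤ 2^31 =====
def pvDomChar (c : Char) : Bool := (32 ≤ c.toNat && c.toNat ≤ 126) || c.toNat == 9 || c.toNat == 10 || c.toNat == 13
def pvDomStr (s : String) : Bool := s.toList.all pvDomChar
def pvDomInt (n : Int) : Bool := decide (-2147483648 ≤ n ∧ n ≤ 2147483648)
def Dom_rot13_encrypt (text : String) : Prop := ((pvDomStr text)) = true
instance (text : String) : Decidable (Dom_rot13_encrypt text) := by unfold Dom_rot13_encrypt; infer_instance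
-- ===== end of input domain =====

set_option maxRecDepth 10000


-- B replaces A's per-character isalpha/isupper arithmetic with a fixed 52-entry
-- translation table built once and a single translate pass (idiomatic).

-- ===== PORT A =====
def rot13_encrypt (text : String) : String :=
  String.mk (text.toList.foldl (fun result c =>
    if PySem.Chars.isalpha c then
      let base : Int := if PySem.Chars.isupper c then 65 else 97
      result ++ [Char.ofNat (((Int.ofNat c.toNat - base + 13) % 26 + base).toNat)]
    else
      result ++ [c]) [])

-- ===== PORT B =====
-- str.maketrans(src, dst): the character-to-character table, as a dict
def rot13Table : PySem.Dict Char Char :=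
  PySem.Dict.ofList
    (List.zip "ABCDEFGHIJKLMNOPQRSTUVWXYZabcdefghijklmnopqrstuvwxyz".toList
              "NOPQRSTUVWXYZABCDEFGHIJKLMnopqrstuvwxyzabcdefghijklm".toList)

-- text.translate(table): map each char through the table, unmapped chars unchanged
def rot13_encrypt_alt (text : String) : String :=
  String.mk (text.toList.map (fun c => (rot13Table.getD c c)))

-- ===== PRECONDITION & SPEC =====
def Spec_rot13_encrypt (text : String) (out : String) : Prop := out = rot13_encrypt_alt text
instance (text : String) (out : String) : Decidable (Spec_rot13_encrypt text out) := by unfold Spec_rot13_encrypt; infer_instance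

-- ===== CLAIM (what is proved, stated in full; the proofs are below) =====
def Claim_equal_rot13_encrypt : Prop := ∀ (text : String), Dom_rot13_encrypt text → Spec_rot13_encrypt text (rot13_encrypt text)

-- ===== LEMMAS AND PROOFS =====

-- A's per-character step
def stepA (c : Char) : Char :=
  if PySem.Chars.isalpha c then
    let base : Int := if PySem.Chars.isupper c then 65 else 97
    Char.ofNat (((Int.ofNat c.toNat - base + 13) % 26 + base).toNat)
  else c

lemma foldl_eq_map_stepA (cs : List Char) (acc : List Char) :
    cs.foldl (fun result c =>
      if PySem.Chars.isalpha c then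
        let base : Int := if PySem.Chars.isupper c then 65 else 97
        result ++ [Char.ofNat (((Int.ofNat c.toNat - base + 13) % 26 + base).toNat)]
      else
        result ++ [c]) acc = acc ++ cs.map stepA := by
  induction cs generalizing acc with
  | nil => simp
  | cons c cs ih =>
    simp only [List.foldl_cons, List.map_cons, ih, stepA]
    split_ifs <;> simp

-- the two per-character maps agree on every char in the ASCII domain
lemma step_agree (n : Nat) (hn : n < 127) :
    stepA (Char.ofNat n) = rot13Table.getD (Char.ofNat n) (Char.ofNat n) := by
  revert hn
  revert n
  decide

lemma char_ofNat_toNat (c : Char) : Char.ofNat c.toNat = c := by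
  rcases c with ⟨v, h⟩
  simp [Char.ofNat, Char.toNat] at *
  split
  · rfl
  · simp_all [Nat.isValidChar]

-- ===== VERDICT (by name: the statement is the Claim_ definition above) =====
theorem rot13_encrypt_spec : Claim_equal_rot13_encrypt := by
  intro text hdom
  unfold Spec_rot13_encrypt rot13_encrypt rot13_encrypt_alt
  rw [foldl_eq_map_stepA]
  simp only [List.nil_append]
  congr 1
  apply List.map_congr_left
  intro c hc
  have hd : pvDomChar c = true := by
    have := (List.all_eq_true.mp hdom) c hc
    exact this
  have hlt : c.toNat < 127 := by
    simp [pvDomChar] at hd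
    omega
  have := step_agree c.toNat hlt
  rwa [char_ofNat_toNat] at this
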